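-- pv_equiv track=rewrite | github.com/PhamAnhQuannn/Job-agent | backend/_gen_missing_answers.py | get_relevant_context
-- ===== SOURCE A (Python) =====
-- def get_relevant_context(answers):
--     """Pull key answers from the bank to give AI full context."""
--     context_keys = [
--         "first name", "last name", "email", "phone", "github",
--         "linkedin", "website", "school", "degree", "graduation",
--         "gpa", "work authorization", "require sponsorship",
--         "willing to relocate", "years of experience",
--         "programming languages", "current location",
--         "start date", "internship duration",
--     ]
--     lines = []
--     for key in context_keys:
--         for pattern, answer in answers.items():
--             if key in pattern.lower() and answer:
--                 lines.append(f"  {pattern}: {answer}")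
--                 break
--     return "\n".join(lines)
-- ===== SOURCE B (Python) =====
-- def get_relevant_context(answers):
--     """Pull key answers from the bank to give AI full context."""
--     context_keys = [
--         "first name", "last name", "email", "phone", "github",
--         "linkedin", "website", "school", "degree", "graduation",
--         "gpa", "work authorization", "require sponsorship",
--         "willing to relocate", "years of experience",
--         "programming languages", "current location",
--         "start date", "internship duration",
--     ]
--     found = {}
--     for pattern, answer in answers.items():
--         if answer:
--             pl = pattern.lower()
--             line = f"  {pattern}: {answer}"
--             for key in context_keys:
--                 if key in pl and key not in found:
--                     found[key] = line
--     return "\n".join(found[key] for key in context_keys if key in found)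
-- ===== Notes on version B (the rewrite author's own statement) =====
-- stated objective: alternative
-- what changed: Instead of rescanning the whole answers dict once per context key (19 scans with break-on-first-match), B makes a single pass over answers.items(), indexing each pattern under every context key it contains (first pattern per key wins), then emits the indexed lines in context-key order.
import Mathlib
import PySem

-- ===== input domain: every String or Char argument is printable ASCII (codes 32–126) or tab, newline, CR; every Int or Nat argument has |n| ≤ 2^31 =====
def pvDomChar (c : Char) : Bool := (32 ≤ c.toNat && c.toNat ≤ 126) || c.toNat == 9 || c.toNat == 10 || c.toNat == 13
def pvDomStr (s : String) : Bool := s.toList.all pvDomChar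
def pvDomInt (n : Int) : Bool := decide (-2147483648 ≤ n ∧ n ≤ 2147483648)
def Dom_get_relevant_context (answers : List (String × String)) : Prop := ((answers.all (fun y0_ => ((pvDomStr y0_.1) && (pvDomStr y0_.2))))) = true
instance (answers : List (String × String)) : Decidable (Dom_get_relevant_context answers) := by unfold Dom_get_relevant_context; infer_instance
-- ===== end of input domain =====

-- B replaces A's per-key rescan of the answers dict by one indexing pass over the
-- answers plus an ordered emit pass (alternative decomposition, same output).


-- the shared constant list `context_keys` (data, used by both ports)
def contextKeys : List String :=
  ["first name", "last name", "email", "phone", "github",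
   "linkedin", "website", "school", "degree", "graduation",
   "gpa", "work authorization", "require sponsorship",
   "willing to relocate", "years of experience",
   "programming languages", "current location",
   "start date", "internship duration"]

-- ===== PORT A =====
-- inner `for pattern, answer in answers.items(): … break` loop of A
def scanAnswers (key : String) : List (String × String) → Option String
  | [] => none
  | (p, a) :: rest =>
    if PySem.Str.isIn key (PySem.Str.lower p) && a != "" then
      some ("  " ++ p ++ ": " ++ a)
    else scanAnswers key rest

def get_relevant_context (answers : List (String × String)) : String :=
  let lines := contextKeys.foldl (fun lines key =>
    match scanAnswers key answers with
    | some line => lines ++ [line]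
    | none => lines) []
  PySem.Str.join "\n" lines

-- ===== PORT B =====
-- inner `for key in context_keys: …` loop of B: index `line` under every key contained in pl
def markKeys (pl line : String) (found : PySem.Dict String String) :
    List String → PySem.Dict String String
  | [] => found
  | key :: ks =>
    markKeys pl line
      (if PySem.Str.isIn key pl && !(found.contains key) then found.insert key line else found) ks

-- outer `for pattern, answer in answers.items():` loop of B
def buildFound : List (String × String) → PySem.Dict String String → PySem.Dict String String
  | [], found => found
  | (p, a) :: rest, found =>
    buildFound rest
      (if a != "" then markKeys (PySem.Str.lower p) ("  " ++ p ++ ": " ++ a) found contextKeys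
       else found)

-- emit pass: `found[key] for key in context_keys if key in found`
def emitLines (found : PySem.Dict String String) : List String → List String
  | [] => []
  | key :: ks =>
    match found.get? key with
    | some line => line :: emitLines found ks
    | none => emitLines found ks

def get_relevant_context_alt (answers : List (String × String)) : String :=
  PySem.Str.join "\n" (emitLines (buildFound answers PySem.Dict.empty) contextKeys)

-- ===== PRECONDITION & SPEC =====
def Spec_get_relevant_context (answers : List (String × String)) (out : String) : Prop := out = get_relevant_context_alt answers
instance (answers : List (String × String)) (out : String) : Decidable (Spec_get_relevant_context answers out) := by unfold Spec_get_relevant_context; infer_instance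

-- ===== CLAIM (what is proved, stated in full; the proofs are below) =====
def Claim_equal_get_relevant_context : Prop := ∀ (answers : List (String × String)), Dom_get_relevant_context answers → Spec_get_relevant_context answers (get_relevant_context answers)

-- ===== LEMMAS AND PROOFS =====

-- markKeys writes `line` exactly at the keys of ks that pl contains and found lacks
theorem get?_markKeys (pl line : String) (ks : List String)
    (found : PySem.Dict String String) (k : String) :
    (markKeys pl line found ks).get? k =
      if k ∈ ks ∧ PySem.Str.isIn k pl = true ∧ found.get? k = none
      then some line else found.get? k := by
  induction ks generalizing found with
  | nil => simp [markKeys]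
  | cons key ks ih =>
    simp only [markKeys]
    rw [ih]
    by_cases hc : found.contains key = true
    · have h1 : (PySem.Str.isIn key pl && !found.contains key) = false := by
        simp only [hc, Bool.not_true, Bool.and_false]
      rw [h1]
      simp only [Bool.false_eq_true, if_false]
      by_cases hk : k = key
      · subst hk
        have hf : ¬ found.get? k = none := by
          rw [PySem.Dict.get?_eq_none_iff_contains]; simp [hc]
        simp [hf, List.mem_cons]
      · simp [List.mem_cons, hk]
    · simp only [Bool.not_eq_true] at hc
      have hf : found.get? key = none := (PySem.Dict.get?_eq_none_iff_contains found key).mpr hc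
      by_cases hin : PySem.Str.isIn key pl = true
      · rw [PySem.Str.isIn_eq] at hin
        have h1 : (PySem.Str.isIn key pl && !found.contains key) = true := by
          simp only [PySem.Str.isIn_eq, hc, Bool.not_false, Bool.and_true]; exact hin
        rw [if_pos h1]
        by_cases hk : k = key
        · subst hk
          rw [PySem.Dict.get?_insert_self]
          simp [PySem.Str.isIn_eq, hin, hf, List.mem_cons]
        · rw [PySem.Dict.get?_insert_of_ne found line hk]
          simp [List.mem_cons, hk]
      · simp only [Bool.not_eq_true, PySem.Str.isIn_eq] at hin
        have h1 : (PySem.Str.isIn key pl && !found.contains key) = false := by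
          simp only [PySem.Str.isIn_eq, hin, Bool.false_and]
        rw [h1]
        simp only [Bool.false_eq_true, if_false]
        by_cases hk : k = key
        · subst hk
          simp [PySem.Str.isIn_eq, hin, List.mem_cons]
        · simp [List.mem_cons, hk]

-- buildFound's entry at a context key is A's first-match scan (unless already set)
theorem get?_buildFound (L : List (String × String))
    (found : PySem.Dict String String) (k : String) (hk : k ∈ contextKeys) :
    (buildFound L found).get? k =
      match found.get? k with
      | some v => some v
      | none => scanAnswers k L := by
  induction L generalizing found with
  | nil =>
    simp only [buildFound, scanAnswers]
    cases found.get? k <;> rfl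
  | cons pa rest ih =>
    obtain ⟨p, a⟩ := pa
    simp only [buildFound]
    rw [ih]
    by_cases ha : a != ""
    · simp only [ha, if_pos]
      rw [get?_markKeys]
      cases hf : found.get? k with
      | some v =>
        simp
      | none =>
        by_cases hin : PySem.Str.isIn k (PySem.Str.lower p) = true
        · have hin' := hin
          simp only [PySem.Str.isIn_eq, PySem.Str.toList_lower] at hin'
          simp [scanAnswers, hk, hin', ha]
        · simp at hin
          simp [scanAnswers, hin]
    · simp only [ha, if_neg, Bool.false_eq_true, not_false_iff]
      have ha' : (a != "") = false := by simpa using ha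
      cases hf : found.get? k with
      | some v => simp
      | none => simp [scanAnswers, ha']

-- the emit pass is a filterMap over the keys
theorem emitLines_eq_filterMap (found : PySem.Dict String String) (ks : List String) :
    emitLines found ks = ks.filterMap (fun k => found.get? k) := by
  induction ks with
  | nil => rfl
  | cons key ks ih =>
    simp only [emitLines, List.filterMap_cons]
    cases found.get? key <;> simp [ih]

-- A's append-fold over the keys is the same filterMap of first-match scans
theorem foldA_eq_filterMap (answers : List (String × String)) (ks : List String)
    (acc : List String) :
    ks.foldl (fun lines key =>
        match scanAnswers key answers with
        | some line => lines ++ [line]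
        | none => lines) acc
      = acc ++ ks.filterMap (fun k => scanAnswers k answers) := by
  induction ks generalizing acc with
  | nil => simp
  | cons key ks ih =>
    simp only [List.foldl_cons, List.filterMap_cons]
    cases h : scanAnswers key answers with
    | none => simp [ih]
    | some line => simp [ih]

-- ===== VERDICT (by name: the statement is the Claim_ definition above) =====
theorem get_relevant_context_spec : Claim_equal_get_relevant_context := by
  intro answers _
  unfold Spec_get_relevant_context get_relevant_context get_relevant_context_alt
  rw [foldA_eq_filterMap, emitLines_eq_filterMap]
  simp only [List.nil_append]
  congr 1
  apply List.filterMap_congr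
  intro k hk
  rw [get?_buildFound answers PySem.Dict.empty k hk]
  simp [PySem.Dict.get?_empty]
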